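-- pv_equiv track=rewrite | github.com/MubarakHimself/QUANTMIND-X | src/agents/departments/heads/research_head.py | _combine_evidence
-- ===== SOURCE A (Python) =====
-- from typing import Any, Dict, List, Optional
--
-- def _combine_evidence(
--
--     knowledge_results: List[Dict[str, Any]],
--     semantic_results: List[Dict[str, Any]],
--     web_results: List[Dict[str, Any]]
-- ) -> List[str]:
--     """Combine evidence from all sources."""
--     evidence = []
--
--     # Add knowledge base evidence
--     for result in knowledge_results:
--         content = result.get("content", "")
--         if content:
--             evidence.append(f"[KB-{result.get('collection', 'unknown')}]: {content[:200]}")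
--
--     # Add semantic memory evidence
--     for result in semantic_results:
--         content = result.get("content", "")
--         if content:
--             evidence.append(f"[Memory]: {content[:200]}")
--
--     # Add web research evidence
--     for result in web_results:
--         content = result.get("content", "")
--         if content:
--             evidence.append(f"[Web]: {content[:200]}")
--
--     return evidence
-- ===== SOURCE B (Python) =====
-- def _combine_evidence(knowledge_results, semantic_results, web_results):
--     """Combine evidence from all sources (data-driven single traversal)."""
--     sources = [
--         (knowledge_results, lambda r: f"[KB-{r.get('collection', 'unknown')}]"),
--         (semantic_results, lambda r: "[Memory]"),
--         (web_results, lambda r: "[Web]"),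
--     ]
--     return [
--         f"{prefix(r)}: {r.get('content', '')[:200]}"
--         for results, prefix in sources
--         for r in results
--         if r.get('content', '')
--     ]
-- ===== Notes on version B (the rewrite author's own statement) =====
-- stated objective: simpler
-- what changed: Replaces three duplicated hand-unrolled append loops with one data-driven comprehension over a table of (results, prefix_fn) sources.
import Mathlib
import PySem

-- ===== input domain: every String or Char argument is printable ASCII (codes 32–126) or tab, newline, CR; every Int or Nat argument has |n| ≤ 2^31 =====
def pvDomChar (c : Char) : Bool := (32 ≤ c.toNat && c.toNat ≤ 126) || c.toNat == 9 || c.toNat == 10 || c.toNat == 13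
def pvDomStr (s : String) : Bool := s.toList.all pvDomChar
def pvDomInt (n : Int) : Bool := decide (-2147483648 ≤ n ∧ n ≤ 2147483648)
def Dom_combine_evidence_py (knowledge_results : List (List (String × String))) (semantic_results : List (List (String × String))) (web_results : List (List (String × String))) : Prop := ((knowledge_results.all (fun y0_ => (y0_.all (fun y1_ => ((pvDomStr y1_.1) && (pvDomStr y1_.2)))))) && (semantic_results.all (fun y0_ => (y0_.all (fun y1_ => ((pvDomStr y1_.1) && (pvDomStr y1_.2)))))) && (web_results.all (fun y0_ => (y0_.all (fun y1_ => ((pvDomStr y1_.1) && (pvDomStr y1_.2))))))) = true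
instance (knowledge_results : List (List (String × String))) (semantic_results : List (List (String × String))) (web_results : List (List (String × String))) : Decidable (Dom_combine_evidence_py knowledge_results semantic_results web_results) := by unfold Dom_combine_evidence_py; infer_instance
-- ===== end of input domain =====

-- ===== PORT A =====
-- r.get(key, default): first-match lookup in the association list (shared dict primitive)
def pvGetD (d : List (String × String)) (k dflt : String) : String :=
  match d.find? (fun p => p.1 == k) with
  | some p => p.2
  | none => dflt

-- B replaces A's three duplicated append loops with one data-driven traversal over a
-- table of (results, prefix-fn) sources; same values, objective: simpler.
def combine_evidence_py (knowledge_results : List (List (String × String))) (semantic_results : List (List (String × String))) (web_results : List (List (String × String))) : List String :=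
  let ev : List String := []
  let ev := knowledge_results.foldl (fun ev result =>
    let content := pvGetD result "content" ""
    if content ≠ "" then
      ev ++ ["[KB-" ++ pvGetD result "collection" "unknown" ++ "]: " ++ PySem.Str.slice content none (some 200)]
    else ev) ev
  let ev := semantic_results.foldl (fun ev result =>
    let content := pvGetD result "content" ""
    if content ≠ "" then
      ev ++ ["[Memory]: " ++ PySem.Str.slice content none (some 200)]
    else ev) ev
  let ev := web_results.foldl (fun ev result =>
    let content := pvGetD result "content" ""
    if content ≠ "" then
      ev ++ ["[Web]: " ++ PySem.Str.slice content none (some 200)]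
    else ev) ev
  ev

-- ===== PORT B =====
def combine_evidence_py_alt (knowledge_results : List (List (String × String))) (semantic_results : List (List (String × String))) (web_results : List (List (String × String))) : List String :=
  let sources : List (List (List (String × String)) × (List (String × String) → String)) :=
    [(knowledge_results, fun r => "[KB-" ++ pvGetD r "collection" "unknown" ++ "]"),
     (semantic_results, fun _ => "[Memory]"),
     (web_results, fun _ => "[Web]")]
  sources.flatMap (fun src =>
    (src.1.filter (fun r => pvGetD r "content" "" != "")).map
      (fun r => src.2 r ++ ": " ++ PySem.Str.slice (pvGetD r "content" "") none (some 200)))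

-- ===== PRECONDITION & SPEC =====
def Spec_combine_evidence_py (knowledge_results : List (List (String × String))) (semantic_results : List (List (String × String))) (web_results : List (List (String × String))) (out : List String) : Prop := out = combine_evidence_py_alt knowledge_results semantic_results web_results
instance (knowledge_results : List (List (String × String))) (semantic_results : List (List (String × String))) (web_results : List (List (String × String))) (out : List String) : Decidable (Spec_combine_evidence_py knowledge_results semantic_results web_results out) := by unfold Spec_combine_evidence_py; infer_instance

-- ===== CLAIM (what is proved, stated in full; the proofs are below) =====
def Claim_equal_combine_evidence_py : Prop := ∀ (knowledge_results : List (List (String × String))) (semantic_results : List (List (String × String))) (web_results : List (List (String × String))), Dom_combine_evidence_py knowledge_results semantic_results web_results → Spec_combine_evidence_py knowledge_results semantic_results web_results (combine_evidence_py knowledge_results semantic_results web_results)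

-- ===== LEMMAS AND PROOFS =====

-- ===== VERDICT (by name: the statement is the Claim_ definition above) =====
-- one source's loop: appending pass with per-element formatter g = filter-then-map
theorem pv_fold_one (l : List (List (String × String))) (g : List (String × String) → String) (acc : List String) :
    l.foldl (fun ev result =>
      if pvGetD result "content" "" ≠ "" then ev ++ [g result] else ev) acc
    = acc ++ (l.filter (fun r => pvGetD r "content" "" != "")).map g := by
  induction l generalizing acc with
  | nil => simp
  | cons h t ih =>
    simp only [ne_eq, ite_not] at ih ⊢
    rw [List.foldl_cons, List.filter_cons]
    by_cases hc : pvGetD h "content" "" = ""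
    · simp [hc, ih]
    · simp [hc, ih]

theorem pv_kb_str (x y : String) : "[KB-" ++ x ++ "]: " ++ y = ("[KB-" ++ x ++ "]") ++ ": " ++ y := by
  have h : ("]" : String) ++ ": " = "]: " := rfl
  rw [← h]
  simp [String.append_assoc]

theorem combine_evidence_py_spec : Claim_equal_combine_evidence_py := by
  intro k s w _
  show combine_evidence_py k s w = combine_evidence_py_alt k s w
  unfold combine_evidence_py combine_evidence_py_alt
  simp only [List.flatMap_cons, List.flatMap_nil, List.append_nil]
  rw [pv_fold_one, pv_fold_one, pv_fold_one]
  simp only [List.nil_append, List.append_assoc]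
  congr 1
  apply List.map_congr_left
  intro r _
  exact pv_kb_str _ _
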